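-- pv_equiv track=rewrite | github.com/Knuckles-Team/universal-skills | universal_skills/core/code-enhancer/scripts/run_linters.py | _parse_bandit_output
-- ===== SOURCE A (Python) =====
-- def _parse_bandit_output(stdout: str) -> list[dict]:
--     """Parse bandit text output into structured findings."""
--     findings = []
--     current: dict = {}
--     for line in stdout.splitlines():
--         if line.startswith(">> Issue:"):
--             if current:
--                 findings.append(current)
--             msg = line.replace(">> Issue:", "").strip()
--             current = {"message": msg, "tool": "bandit", "severity": "Medium"}
--         elif line.strip().startswith("Severity:"):
--             parts = line.strip().split()
--             if len(parts) >= 2: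
--                 current["severity"] = parts[1]
--         elif line.strip().startswith("Location:"):
--             loc = line.strip().replace("Location:", "").strip()
--             loc_parts = loc.split(":")
--             if len(loc_parts) >= 2:
--                 current["file"] = loc_parts[0]
--                 current["line"] = loc_parts[1]
--         elif line.strip().startswith("CWE:"):
--             current["cwe"] = line.strip().split("(")[0].replace("CWE:", "").strip()
--     if current:
--         findings.append(current)
--     return findings
-- ===== SOURCE B (Python) =====
-- def _is_marker(line):
--     return line.startswith(">> Issue:")
--
--
-- def _parse_block(header, body):
--     """Parse one issue block (header = the '>> Issue:' line, body = following lines)."""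
--     finding = {
--         "message": header.replace(">> Issue:", "").strip(),
--         "tool": "bandit",
--         "severity": "Medium",
--     }
--     for line in body:
--         s = line.strip()
--         if s.startswith("Severity:"):
--             parts = s.split()
--             if len(parts) >= 2:
--                 finding["severity"] = parts[1]
--         elif s.startswith("Location:"):
--             loc = s.replace("Location:", "").strip()
--             loc_parts = loc.split(":")
--             if len(loc_parts) >= 2:
--                 finding["file"] = loc_parts[0]
--                 finding["line"] = loc_parts[1]
--         elif s.startswith("CWE:"):
--             finding["cwe"] = s.split("(")[0].replace("CWE:", "").strip()
--     return finding
--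
--
-- def _parse_blocks(lines):
--     """lines is empty or starts with a marker line; split off one block, recurse."""
--     if not lines:
--         return []
--     body = []
--     rest = lines[1:]
--     while rest and not _is_marker(rest[0]):
--         body.append(rest.pop(0))
--     return [_parse_block(lines[0], body)] + _parse_blocks(rest)
--
--
-- def _parse_bandit_output(stdout: str) -> list[dict]:
--     lines = stdout.splitlines()
--     # drop everything before the first issue marker
--     while lines and not _is_marker(lines[0]):
--         lines.pop(0)
--     return _parse_blocks(lines)
-- ===== Notes on version B (the rewrite author's own statement) =====
-- stated objective: alternative
-- what changed: A's single accumulate-and-flush loop with a mutable in-progress dict is re-decomposed into three independent passes: drop the preamble before the first issue marker, split the remaining lines into marker-headed blocks by recursion, and parse each block into its finding dict on its own.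
-- intended difference: On inputs where a severity, location or CWE field line precedes the first issue-marker line, A emits a spurious message-less leading finding built from that preamble text, while B ignores pre-marker text and returns only the marker-headed findings, which is the intended parse of bandit output. — e.g. on _parse_bandit_output("CWE: x"): A returns [[("cwe", "x")]], B returns []
import Mathlib
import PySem

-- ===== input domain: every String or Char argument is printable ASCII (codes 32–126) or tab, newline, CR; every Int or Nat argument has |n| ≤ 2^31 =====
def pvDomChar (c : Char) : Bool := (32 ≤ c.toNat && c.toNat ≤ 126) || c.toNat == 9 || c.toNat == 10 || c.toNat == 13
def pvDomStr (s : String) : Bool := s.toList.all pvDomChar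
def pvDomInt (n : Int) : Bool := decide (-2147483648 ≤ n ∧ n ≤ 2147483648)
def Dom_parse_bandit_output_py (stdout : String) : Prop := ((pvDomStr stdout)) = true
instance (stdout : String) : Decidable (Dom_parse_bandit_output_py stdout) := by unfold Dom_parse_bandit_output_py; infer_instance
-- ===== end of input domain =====

-- B re-decomposes A's accumulate-and-flush loop into: drop the pre-marker preamble, split the
-- lines into marker-headed blocks by recursion, parse each block independently (objective:
-- alternative decomposition; B intentionally drops message-less preamble findings — see D_ below).

-- ===== PORT A =====
-- loop body of A's single for-loop: state = (findings, current)
def pvStepA (st : List (List (String × String)) × PySem.Dict String String) (line : String) :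
    List (List (String × String)) × PySem.Dict String String :=
  if PySem.Str.startswith line ">> Issue:" then
    let findings := if st.2.items ≠ [] then st.1 ++ [st.2.items] else st.1
    let msg := PySem.Str.strip (PySem.Str.replace line ">> Issue:" "")
    (findings,
      ((PySem.Dict.empty.insert "message" msg).insert "tool" "bandit").insert "severity" "Medium")
  else if PySem.Str.startswith (PySem.Str.strip line) "Severity:" then
    let parts := PySem.Str.split₀ (PySem.Str.strip line)
    if parts.length ≥ 2 then (st.1, st.2.insert "severity" (parts.getD 1 "")) else st
  else if PySem.Str.startswith (PySem.Str.strip line) "Location:" then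
    let loc := PySem.Str.strip (PySem.Str.replace (PySem.Str.strip line) "Location:" "")
    let locParts := (PySem.Str.split? loc ":").getD []   -- sep ":" ≠ "" so split? is always some
    if locParts.length ≥ 2 then
      (st.1, (st.2.insert "file" (locParts.getD 0 "")).insert "line" (locParts.getD 1 ""))
    else st
  else if PySem.Str.startswith (PySem.Str.strip line) "CWE:" then
    (st.1, st.2.insert "cwe" (PySem.Str.strip (PySem.Str.replace
      (((PySem.Str.split? (PySem.Str.strip line) "(").getD []).getD 0 "") "CWE:" "")))
  else st

def parse_bandit_output_py (stdout : String) : List (List (String × String)) :=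
  let r := (PySem.Str.splitlines stdout).foldl pvStepA ([], PySem.Dict.empty)
  if r.2.items ≠ [] then r.1 ++ [r.2.items] else r.1

-- ===== PORT B =====
def pvIsMarker (line : String) : Bool := PySem.Str.startswith line ">> Issue:"

-- per-line field update inside one block (_parse_block's loop body in Source B)
def pvFieldStep (finding : PySem.Dict String String) (line : String) : PySem.Dict String String :=
  let s := PySem.Str.strip line
  if PySem.Str.startswith s "Severity:" then
    let parts := PySem.Str.split₀ s
    if parts.length ≥ 2 then finding.insert "severity" (parts.getD 1 "") else finding
  else if PySem.Str.startswith s "Location:" then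
    let loc := PySem.Str.strip (PySem.Str.replace s "Location:" "")
    let locParts := (PySem.Str.split? loc ":").getD []   -- sep ":" ≠ "" so split? is always some
    if locParts.length ≥ 2 then
      (finding.insert "file" (locParts.getD 0 "")).insert "line" (locParts.getD 1 "")
    else finding
  else if PySem.Str.startswith s "CWE:" then
    finding.insert "cwe" (PySem.Str.strip (PySem.Str.replace
      (((PySem.Str.split? s "(").getD []).getD 0 "") "CWE:" ""))
  else finding

def pvParseBlock (header : String) (body : List String) : List (String × String) :=
  (body.foldl pvFieldStep
    (((PySem.Dict.empty.insert "message"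
        (PySem.Str.strip (PySem.Str.replace header ">> Issue:" ""))).insert "tool"
        "bandit").insert "severity" "Medium")).items

-- _parse_blocks: lines is empty or starts with a marker; split off one block, recurse.
-- The fuel argument (called with fuel = lines.length, which the recursion never exhausts since
-- dropWhile does not lengthen a list) only makes the recursion structural; it changes no value.
def pvParseBlocksF : Nat → List String → List (List (String × String))
  | _, [] => []
  | 0, _ :: _ => []
  | fuel + 1, h :: t =>
      pvParseBlock h (t.takeWhile fun l => !pvIsMarker l) ::
        pvParseBlocksF fuel (t.dropWhile fun l => !pvIsMarker l)

def parse_bandit_output_py_alt (stdout : String) : List (List (String × String)) :=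
  let rest := (PySem.Str.splitlines stdout).dropWhile fun l => !pvIsMarker l
  pvParseBlocksF rest.length rest

-- ===== PRECONDITION & SPEC =====
-- closed-form shape of a "field line": after stripping, it carries a Severity: prefix followed by
-- a second word, or a Location: prefix with a colon-separated location, or a CWE: prefix
def pvFieldLine (cs : List Char) : Bool :=
  (PySem.Chars.startswith (PySem.Chars.strip cs) "Severity:".toList &&
    decide (2 ≤ (PySem.Chars.split₀ (PySem.Chars.strip cs)).length)) ||
  (PySem.Chars.startswith (PySem.Chars.strip cs) "Location:".toList &&
    decide (2 ≤ ((PySem.Chars.split? (PySem.Chars.strip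
      (PySem.Chars.replace (PySem.Chars.strip cs) "Location:".toList [])) [':']).getD
        []).length)) ||
  PySem.Chars.startswith (PySem.Chars.strip cs) "CWE:".toList

-- On inputs where a severity, location or CWE field line precedes the first issue-marker line, A
-- emits a spurious message-less leading finding built from that preamble text; B ignores pre-marker
-- text, which is the intended parse of bandit output.
def D_parse_bandit_output_py (stdout : String) : Prop :=
  ∃ l ∈ (PySem.Str.splitlines stdout).takeWhile
      (fun l => !(PySem.Str.startswith l ">> Issue:")), pvFieldLine l.toList = true
instance (stdout : String) : Decidable (D_parse_bandit_output_py stdout) := by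
  unfold D_parse_bandit_output_py; infer_instance

def Spec_parse_bandit_output_py (stdout : String) (out : List (List (String × String))) : Prop :=
  ¬ D_parse_bandit_output_py stdout → out = parse_bandit_output_py_alt stdout
instance (stdout : String) (out : List (List (String × String))) :
    Decidable (Spec_parse_bandit_output_py stdout out) := by
  unfold Spec_parse_bandit_output_py; infer_instance

def pvDiffWitness_parse_bandit_output_py : String := "CWE: x"
def pvDiffWitnessOut_parse_bandit_output_py :
    (List (List (String × String))) × (List (List (String × String))) :=
  ([[("cwe", "x")]], [])

-- ===== CLAIM (what is proved, stated in full; the proofs are below) =====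
def Claim_unchanged_parse_bandit_output_py : Prop := ∀ (stdout : String),
  Dom_parse_bandit_output_py stdout →
    Spec_parse_bandit_output_py stdout (parse_bandit_output_py stdout)
def Claim_changed_parse_bandit_output_py : Prop :=
  Dom_parse_bandit_output_py (pvDiffWitness_parse_bandit_output_py) ∧
  D_parse_bandit_output_py (pvDiffWitness_parse_bandit_output_py) ∧
  parse_bandit_output_py (pvDiffWitness_parse_bandit_output_py) =
    pvDiffWitnessOut_parse_bandit_output_py.1 ∧
  parse_bandit_output_py_alt (pvDiffWitness_parse_bandit_output_py) =
    pvDiffWitnessOut_parse_bandit_output_py.2 ∧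
  pvDiffWitnessOut_parse_bandit_output_py.1 ≠ pvDiffWitnessOut_parse_bandit_output_py.2
def Claim_exact_parse_bandit_output_py : Prop := ∀ (stdout : String),
  Dom_parse_bandit_output_py stdout → D_parse_bandit_output_py stdout →
    parse_bandit_output_py stdout ≠ parse_bandit_output_py_alt stdout

-- ===== LEMMAS AND PROOFS =====

-- final flush of A's loop state
def pvFlush (r : List (List (String × String)) × PySem.Dict String String) :
    List (List (String × String)) :=
  if r.2.items ≠ [] then r.1 ++ [r.2.items] else r.1

-- pvParseBlocksF at its canonical fuel
def pvPB (lines : List String) : List (List (String × String)) :=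
  pvParseBlocksF lines.length lines

-- the dict seeded at a marker line
def pvInit (header : String) : PySem.Dict String String :=
  ((PySem.Dict.empty.insert "message"
      (PySem.Str.strip (PySem.Str.replace header ">> Issue:" ""))).insert "tool"
      "bandit").insert "severity" "Medium"

-- proof-side restatement of the elif chain's write condition, and its bridge to pvFieldLine
def pvEffective (line : String) : Bool :=
  let s := PySem.Str.strip line
  if PySem.Str.startswith s "Severity:" then decide ((PySem.Str.split₀ s).length ≥ 2)
  else if PySem.Str.startswith s "Location:" then
    decide (((PySem.Str.split? (PySem.Str.strip (PySem.Str.replace s "Location:" "")) ":").getD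
      []).length ≥ 2)
  else PySem.Str.startswith s "CWE:"

theorem pvStartswith_head {s p : List Char} {c : Char}
    (hp : PySem.Chars.startswith s p = true) (hc : p.head? = some c) : s.head? = some c := by
  rcases (PySem.Chars.startswith_iff s p).mp hp with ⟨t, rfl⟩
  cases p with
  | nil => simp at hc
  | cons a q => simp_all

theorem pvFieldLine_eq (l : String) : pvFieldLine l.toList = pvEffective l := by
  have h1 : (PySem.Str.split₀ (PySem.Str.strip l)).length =
      (PySem.Chars.split₀ (PySem.Chars.strip l.toList)).length := by
    rw [← PySem.Str.toList_strip, ← PySem.Str.split₀_map_toList, List.length_map]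
  have h2 : ((PySem.Str.split? (PySem.Str.strip (PySem.Str.replace (PySem.Str.strip l)
        "Location:" "")) ":").getD []).length =
      ((PySem.Chars.split? (PySem.Chars.strip
        (PySem.Chars.replace (PySem.Chars.strip l.toList) "Location:".toList [])) [':']).getD
          []).length := by
    have hm := PySem.Str.split?_map
      (PySem.Str.strip (PySem.Str.replace (PySem.Str.strip l) "Location:" "")) ":"
    rw [PySem.Str.toList_strip, PySem.Str.toList_replace, PySem.Str.toList_strip] at hm
    cases hx : PySem.Str.split? (PySem.Str.strip (PySem.Str.replace (PySem.Str.strip l)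
        "Location:" "")) ":" <;> rw [hx] at hm <;>
      rw [show "".toList = ([] : List Char) from by decide,
        show ":".toList = [':'] from by decide] at hm <;> rw [← hm] <;> simp
  simp only [pvFieldLine, pvEffective, PySem.Str.startswith_eq, PySem.Str.toList_strip, h1, h2]
  cases hsv : PySem.Chars.startswith (PySem.Chars.strip l.toList) "Severity:".toList with
  | true =>
      cases hlo : PySem.Chars.startswith (PySem.Chars.strip l.toList) "Location:".toList with
      | true =>
          exact absurd ((pvStartswith_head (c := 'S') hsv (by decide)).symm.trans
            (pvStartswith_head (c := 'L') hlo (by decide))) (by decide)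
      | false =>
          cases hcw : PySem.Chars.startswith (PySem.Chars.strip l.toList) "CWE:".toList with
          | true =>
              exact absurd ((pvStartswith_head (c := 'S') hsv (by decide)).symm.trans
                (pvStartswith_head (c := 'C') hcw (by decide))) (by decide)
          | false => simp
  | false =>
      cases hlo : PySem.Chars.startswith (PySem.Chars.strip l.toList) "Location:".toList with
      | true =>
          cases hcw : PySem.Chars.startswith (PySem.Chars.strip l.toList) "CWE:".toList with
          | true =>
              exact absurd ((pvStartswith_head (c := 'L') hlo (by decide)).symm.trans
                (pvStartswith_head (c := 'C') hcw (by decide))) (by decide)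
          | false => simp
      | false => simp

theorem pvA_eq_flush (stdout : String) : parse_bandit_output_py stdout =
    pvFlush ((PySem.Str.splitlines stdout).foldl pvStepA ([], PySem.Dict.empty)) := rfl

theorem pvAlt_eq (stdout : String) : parse_bandit_output_py_alt stdout =
    pvPB ((PySem.Str.splitlines stdout).dropWhile fun l => !pvIsMarker l) := rfl

theorem pvParseBlocksF_fuel (f1 f2 : Nat) (lines : List String) (h1 : lines.length ≤ f1)
    (h2 : lines.length ≤ f2) : pvParseBlocksF f1 lines = pvParseBlocksF f2 lines := by
  induction f1 generalizing f2 lines with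
  | zero =>
      cases lines with
      | nil => cases f2 <;> rfl
      | cons a t => simp at h1
  | succ f ih =>
      cases lines with
      | nil => cases f2 <;> rfl
      | cons a t =>
          cases f2 with
          | zero => simp at h2
          | succ g =>
              simp only [List.length_cons] at h1 h2
              simp only [pvParseBlocksF]
              congr 1
              exact ih g _ (le_trans (t.length_dropWhile_le _) (by omega))
                (le_trans (t.length_dropWhile_le _) (by omega))

theorem pvParseBlocksF_congr (fuel : Nat) (lines : List String) (h : lines.length ≤ fuel) :
    pvParseBlocksF fuel lines = pvPB lines :=
  pvParseBlocksF_fuel fuel lines.length lines h le_rfl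

theorem pvPB_cons (a : String) (t : List String) :
    pvPB (a :: t) = pvParseBlock a (t.takeWhile fun l => !pvIsMarker l) ::
      pvPB (t.dropWhile fun l => !pvIsMarker l) := by
  simp only [pvPB, List.length_cons, pvParseBlocksF]
  rw [pvParseBlocksF_congr _ _ (t.length_dropWhile_le _)]
  rfl

theorem pvParseBlock_eq (h : String) (b : List String) :
    pvParseBlock h b = (b.foldl pvFieldStep (pvInit h)).items := rfl

theorem pvStepA_marker (fs : List (List (String × String))) (cur : PySem.Dict String String)
    (l : String) (h : pvIsMarker l = true) :
    pvStepA (fs, cur) l = ((if cur.items ≠ [] then fs ++ [cur.items] else fs), pvInit l) := by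
  unfold pvIsMarker at h
  have h' : PySem.Chars.startswith l.toList ">> Issue:".toList = true := by simpa using h
  simp only [pvStepA, pvInit, PySem.Str.startswith_eq, h']
  simp only [if_true]

theorem pvStepA_nonmarker (fs : List (List (String × String))) (cur : PySem.Dict String String)
    (l : String) (h : pvIsMarker l = false) :
    pvStepA (fs, cur) l = (fs, pvFieldStep cur l) := by
  unfold pvIsMarker at h
  have h' : PySem.Chars.startswith l.toList ">> Issue:".toList = false := by simpa using h
  simp only [pvStepA, pvFieldStep, PySem.Str.startswith_eq, h', Bool.false_eq_true, if_false]
  split_ifs <;> rfl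

theorem pvInsert_items_ne_nil {κ ν : Type} [BEq κ] (d : PySem.Dict κ ν) (k : κ) (v : ν) :
    (d.insert k v).items ≠ [] := by
  obtain ⟨items⟩ := d
  cases items with
  | nil => simp [PySem.Dict.insert, PySem.Dict.contains]
  | cons a t => unfold PySem.Dict.insert; split <;> simp

theorem pvFieldStep_ne_nil (cur : PySem.Dict String String) (l : String)
    (h : cur.items ≠ []) : (pvFieldStep cur l).items ≠ [] := by
  simp only [pvFieldStep]
  split_ifs <;> first | exact h | apply pvInsert_items_ne_nil

theorem pvFieldStep_ineffective (cur : PySem.Dict String String) (l : String)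
    (h : pvEffective l = false) : pvFieldStep cur l = cur := by
  simp only [pvEffective] at h
  simp only [pvFieldStep]
  split_ifs at h ⊢ <;> first | rfl | simp_all

theorem pvFieldStep_eff_ne_nil (cur : PySem.Dict String String) (l : String)
    (h : pvEffective l = true) : (pvFieldStep cur l).items ≠ [] := by
  simp only [pvEffective] at h
  simp only [pvFieldStep]
  split_ifs at h ⊢ <;> first | apply pvInsert_items_ne_nil | simp_all

theorem pvInit_ne_nil (l : String) : (pvInit l).items ≠ [] := pvInsert_items_ne_nil _ _ _

-- main run lemma: from a non-empty current dict, A's remaining run produces the current block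
-- followed by B's parse of the remaining marker-headed blocks
theorem pvRun_eq (lines : List String) (fs : List (List (String × String)))
    (cur : PySem.Dict String String) (h : cur.items ≠ []) :
    pvFlush (lines.foldl pvStepA (fs, cur)) =
      fs ++ ((lines.takeWhile fun l => !pvIsMarker l).foldl pvFieldStep cur).items ::
        pvPB (lines.dropWhile fun l => !pvIsMarker l) := by
  induction lines generalizing fs cur with
  | nil => simp [pvFlush, pvPB, pvParseBlocksF, h]
  | cons a t ih =>
      cases hm : pvIsMarker a with
      | false =>
          rw [List.foldl_cons, pvStepA_nonmarker _ _ _ hm, ih fs _ (pvFieldStep_ne_nil _ _ h)]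
          simp [hm]
      | true =>
          rw [List.foldl_cons, pvStepA_marker _ _ _ hm, if_pos h, ih _ _ (pvInit_ne_nil a),
            show List.takeWhile (fun l => !pvIsMarker l) (a :: t) = [] from by simp [hm],
            show List.dropWhile (fun l => !pvIsMarker l) (a :: t) = a :: t from by simp [hm],
            pvPB_cons, pvParseBlock_eq]
          simp

-- fold of A's step over non-marker lines only updates the current dict
theorem pvFold_nonmarker (lines : List String) (fs : List (List (String × String)))
    (cur : PySem.Dict String String) (h : ∀ l ∈ lines, pvIsMarker l = false) :
    lines.foldl pvStepA (fs, cur) = (fs, lines.foldl pvFieldStep cur) := by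
  induction lines generalizing cur with
  | nil => rfl
  | cons a t ih =>
      simp only [List.foldl_cons, pvStepA_nonmarker _ _ _ (h a (by simp))]
      exact ih _ fun l hl => h l (by simp [hl])

-- A's whole run, split at the preamble (which contains no marker lines)
theorem pvA_split (stdout : String) :
    parse_bandit_output_py stdout =
      pvFlush (((PySem.Str.splitlines stdout).dropWhile fun l => !pvIsMarker l).foldl pvStepA
        ([], ((PySem.Str.splitlines stdout).takeWhile fun l => !pvIsMarker l).foldl
          pvFieldStep PySem.Dict.empty)) := by
  have hpre : ((PySem.Str.splitlines stdout).takeWhile fun l => !pvIsMarker l).foldl pvStepA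
      ([], PySem.Dict.empty) =
      ([], ((PySem.Str.splitlines stdout).takeWhile fun l => !pvIsMarker l).foldl
        pvFieldStep PySem.Dict.empty) :=
    pvFold_nonmarker _ _ _ fun l hl => by simpa using List.mem_takeWhile_imp hl
  rw [pvA_eq_flush]
  conv_lhs => rw [← List.takeWhile_append_dropWhile (p := fun l => !pvIsMarker l)
    (l := PySem.Str.splitlines stdout)]
  rw [List.foldl_append, hpre]

-- the rest (a dropWhile residue) is empty or starts with a marker; run A over it
theorem pvRest_run (rest : List String) (cur : PySem.Dict String String)
    (hrest : rest = [] ∨ ∃ m t, rest = m :: t ∧ pvIsMarker m = true) :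
    pvFlush (rest.foldl pvStepA ([], cur)) =
      (if cur.items ≠ [] then [cur.items] else []) ++ pvPB rest := by
  rcases hrest with h | ⟨m, t, rfl, hm⟩
  · subst h
    simp only [List.foldl_nil, pvFlush, pvPB, pvParseBlocksF, List.append_nil]
    split_ifs <;> simp_all
  · simp only [List.foldl_cons, pvStepA_marker _ _ _ hm]
    rw [pvRun_eq _ _ _ (pvInit_ne_nil m), pvPB_cons, pvParseBlock_eq]
    split_ifs <;> simp

theorem pvDropWhile_shape (lines : List String) :
    (lines.dropWhile fun l => !pvIsMarker l) = [] ∨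
      ∃ m t, (lines.dropWhile fun l => !pvIsMarker l) = m :: t ∧ pvIsMarker m = true := by
  induction lines with
  | nil => exact Or.inl rfl
  | cons a t ih =>
      rw [List.dropWhile_cons]
      cases hm : pvIsMarker a with
      | false => simpa [hm] using ih
      | true => exact Or.inr ⟨a, t, by simp, hm⟩

-- A = (possible spurious preamble finding) ++ B
theorem pvMain (stdout : String) :
    parse_bandit_output_py stdout =
      (if (((PySem.Str.splitlines stdout).takeWhile fun l => !pvIsMarker l).foldl
          pvFieldStep PySem.Dict.empty).items ≠ []
        then [(((PySem.Str.splitlines stdout).takeWhile fun l => !pvIsMarker l).foldl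
          pvFieldStep PySem.Dict.empty).items] else []) ++
        parse_bandit_output_py_alt stdout := by
  rw [pvA_split, pvAlt_eq, pvRest_run _ _ (pvDropWhile_shape _)]

theorem pvPre_fold_empty (lines : List String) (h : ∀ l ∈ lines, pvEffective l = false) :
    lines.foldl pvFieldStep PySem.Dict.empty = PySem.Dict.empty := by
  induction lines with
  | nil => rfl
  | cons a t ih =>
      rw [List.foldl_cons, pvFieldStep_ineffective _ _ (h a (by simp))]
      exact ih fun l hl => h l (by simp [hl])

theorem pvFold_ne_nil (lines : List String) (d : PySem.Dict String String)
    (h : (∃ l ∈ lines, pvEffective l = true) ∨ d.items ≠ []) :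
    (lines.foldl pvFieldStep d).items ≠ [] := by
  induction lines generalizing d with
  | nil => simpa using h.resolve_left (by simp)
  | cons a t ih =>
      rw [List.foldl_cons]
      apply ih
      cases heff : pvEffective a with
      | true => exact Or.inr (pvFieldStep_eff_ne_nil _ _ heff)
      | false =>
          rcases h with ⟨l, hl, he⟩ | hd
          · rcases List.mem_cons.mp hl with rfl | hl
            · rw [heff] at he; exact absurd he (by simp)
            · exact Or.inl ⟨l, hl, he⟩
          · exact Or.inr (pvFieldStep_ne_nil _ _ hd)

theorem pvPre_fold_ne_nil (lines : List String) (h : ∃ l ∈ lines, pvEffective l = true) :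
    (lines.foldl pvFieldStep PySem.Dict.empty).items ≠ [] :=
  pvFold_ne_nil lines _ (Or.inl h)

-- ===== VERDICT (by name: the statement is the Claim_ definition above) =====
theorem parse_bandit_output_py_spec : Claim_unchanged_parse_bandit_output_py := by
  intro stdout _ hnD
  have hpre : ∀ l ∈ (PySem.Str.splitlines stdout).takeWhile (fun l => !pvIsMarker l),
      pvEffective l = false := by
    intro l hl
    by_contra hc
    exact hnD ⟨l, hl, by rw [pvFieldLine_eq]; simpa using hc⟩
  rw [pvMain, pvPre_fold_empty _ hpre]
  simp [PySem.Dict.empty]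

theorem parse_bandit_output_py_changed : Claim_changed_parse_bandit_output_py := by
  unfold Claim_changed_parse_bandit_output_py; decide

theorem parse_bandit_output_py_tight : Claim_exact_parse_bandit_output_py := by
  intro stdout _ hD heq
  unfold D_parse_bandit_output_py at hD
  have hne : (((PySem.Str.splitlines stdout).takeWhile fun l => !pvIsMarker l).foldl
      pvFieldStep PySem.Dict.empty).items ≠ [] := by
    apply pvPre_fold_ne_nil
    obtain ⟨l, hl, he⟩ := hD
    exact ⟨l, hl, by rwa [pvFieldLine_eq] at he⟩
  have := pvMain stdout
  rw [if_pos hne, heq] at this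
  exact (List.cons_ne_self _ _) this.symm
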